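-- pv_equiv track=rewrite | github.com/Andr-Rud/Ylab_Rudoi | Ylab_HW1.py | count_find_num
-- ===== SOURCE A (Python) =====
-- def recursion_for_task_5(primesL, limit, result, val):
--     if (val <= limit):
--         result.add(val)
--
--         for i in primesL:
--             recursion_for_task_5(primesL, limit, result, val * i)
--
-- def count_find_num(primesL, limit):
--     result = set()
--     temp = 1
--
--     for i in primesL:
--         temp *= i
--
--     if (temp > limit):
--         return []
--
--     recursion_for_task_5(primesL, limit, result, temp)
--
--     return [len(result), max(result)]
-- ===== SOURCE B (Python) =====
-- def count_find_num(primesL, limit):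
--     temp = 1
--     for p in primesL:
--         temp *= p
--     if temp > limit:
--         return []
--     seen = {temp}
--     stack = [temp]
--     while stack:
--         v = stack.pop()
--         for p in primesL:
--             w = v * p
--             if w <= limit and w not in seen:
--                 seen.add(w)
--                 stack.append(w)
--     return [len(seen), max(seen)]
-- ===== Notes on version B (the rewrite author's own statement) =====
-- stated objective: alternative
-- what changed: A collects products by a naive DFS that re-expands a product once per factorisation path; B runs a worklist search with a visited set so each distinct product <= limit is expanded exactly once.
-- outside the precondition, e.g. on count_find_num([-2, -3], 10): A returns [3, 6], B returns [3, 6]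
import Mathlib
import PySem

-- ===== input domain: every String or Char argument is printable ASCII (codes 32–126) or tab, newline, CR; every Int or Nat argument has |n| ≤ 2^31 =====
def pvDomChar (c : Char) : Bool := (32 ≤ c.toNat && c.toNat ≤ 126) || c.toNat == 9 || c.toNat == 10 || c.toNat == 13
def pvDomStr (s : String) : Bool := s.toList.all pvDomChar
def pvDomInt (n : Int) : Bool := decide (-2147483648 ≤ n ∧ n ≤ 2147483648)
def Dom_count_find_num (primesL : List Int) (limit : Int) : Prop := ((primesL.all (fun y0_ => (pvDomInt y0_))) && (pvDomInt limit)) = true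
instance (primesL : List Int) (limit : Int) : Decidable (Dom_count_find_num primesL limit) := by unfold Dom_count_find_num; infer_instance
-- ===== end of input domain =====

-- B replaces A's recursive DFS (which re-expands a product once per factorisation path) by a
-- worklist search with a visited set, so each distinct product is expanded exactly once.

-- ===== PORT A =====
-- recursion_for_task_5; the fuel counter only guards termination and is never exhausted under Pre_.
def rec5A (primesL : List Int) (limit : Int) : Nat → PySem.Set Int → Int → PySem.Set Int
  | 0, result, _ => result
  | f + 1, result, val =>
    if val ≤ limit then
      primesL.foldl (fun r i => rec5A primesL limit f r (val * i)) (PySem.Set.add result val)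
    else result

def count_find_num (primesL : List Int) (limit : Int) : List Int :=
  let temp := primesL.foldl (fun t i => t * i) 1
  if temp > limit then []
  else
    let result := rec5A primesL limit (limit.toNat + 1) PySem.Set.empty temp
    [(result.length : Int), (PySem.List.max? result (fun x => x)).getD 0]

-- ===== PORT B =====
-- worklist loop of Source B; the fuel counter only guards termination and is never exhausted under Pre_.
def loopB (primesL : List Int) (limit : Int) : Nat → List Int → PySem.Set Int → PySem.Set Int
  | 0, _, seen => seen
  | _ + 1, [], seen => seen
  | f + 1, v :: rest, seen =>
    let r := primesL.foldl
      (fun (p : List Int × PySem.Set Int) i =>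
        if v * i ≤ limit ∧ v * i ∉ p.2 then (v * i :: p.1, PySem.Set.add p.2 (v * i)) else p)
      (rest, seen)
    loopB primesL limit f r.1 r.2

def count_find_num_alt (primesL : List Int) (limit : Int) : List Int :=
  let temp := primesL.foldl (fun t i => t * i) 1
  if temp > limit then []
  else
    let seen := loopB primesL limit (2 * limit.toNat + 3) [temp] (PySem.Set.ofList [temp])
    [(seen.length : Int), (PySem.List.max? seen (fun x => x)).getD 0]

-- ===== PRECONDITION & SPEC =====
-- Pre_ restricts to the function's natural domain, lists of primes (entries ≥ 2), except when the
-- product already exceeds limit (then A returns [] before recursing, for any list): outside it A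
-- recurses forever (RecursionError) whenever the list has an entry in {-1,0,1} or mixed signs with
-- product ≤ limit, and on all-negative lists A's value arises only from accidental sign alternation.
def Pre_count_find_num (primesL : List Int) (limit : Int) : Prop :=
  limit < primesL.foldl (fun t i => t * i) 1 ∨ ∀ p ∈ primesL, 2 ≤ p
instance (primesL : List Int) (limit : Int) : Decidable (Pre_count_find_num primesL limit) := by
  unfold Pre_count_find_num; infer_instance

def pvWitness_count_find_num : List Int × Int := ([2, 3], 20)

def Spec_count_find_num (primesL : List Int) (limit : Int) (out : List Int) : Prop := out = count_find_num_alt primesL limit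
instance (primesL : List Int) (limit : Int) (out : List Int) : Decidable (Spec_count_find_num primesL limit out) := by unfold Spec_count_find_num; infer_instance

-- ===== CLAIM (what is proved, stated in full; the proofs are below) =====
def Claim_equal_count_find_num : Prop := ∀ (primesL : List Int) (limit : Int), Dom_count_find_num primesL limit → Pre_count_find_num primesL limit → Spec_count_find_num primesL limit (count_find_num primesL limit)

-- ===== LEMMAS AND PROOFS =====

-- Backward reachability: RF P L v x holds iff A's recursion started at v adds x
-- (a chain v → v*p → … → x with every chain element ≤ L).
inductive RF (P : List Int) (L : Int) : Int → Int → Prop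
  | base : ∀ v, v ≤ L → RF P L v v
  | step : ∀ v p x, v ≤ L → p ∈ P → RF P L (v * p) x → RF P L v x

-- Forward reachability, suited to B's worklist closure.
inductive Rch (P : List Int) (L : Int) (t : Int) : Int → Prop
  | base : t ≤ L → Rch P L t t
  | step : ∀ v p, Rch P L t v → p ∈ P → v * p ≤ L → Rch P L t (v * p)

theorem RF_le {P : List Int} {L v x : Int} (h : RF P L v x) : v ≤ L := by
  cases h <;> assumption

theorem Rch_trans {P : List Int} {L t v x : Int} (h1 : Rch P L v x) (h2 : Rch P L t v) :
    Rch P L t x := by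
  induction h1 with
  | base _ => exact h2
  | step w q hw hq hle ih => exact Rch.step w q ih hq hle

theorem RF_to_Rch {P : List Int} {L v x : Int} (h : RF P L v x) : Rch P L v x := by
  induction h with
  | base w hw => exact Rch.base hw
  | step w q y hw hq hsub ih =>
      exact Rch_trans ih (Rch.step w q (Rch.base hw) hq (RF_le hsub))

theorem RF_snoc {P : List Int} {L t v p : Int} (h : RF P L t v) (hp : p ∈ P) :
    v * p ≤ L → RF P L t (v * p) := by
  induction h with
  | base w hw => intro hle; exact RF.step w p (w * p) hw hp (RF.base _ hle)
  | step w q y hw hq hsub ih => intro hle; exact RF.step w q _ hw hq (ih hle)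

theorem Rch_to_RF {P : List Int} {L t x : Int} (h : Rch P L t x) : RF P L t x := by
  induction h with
  | base ht => exact RF.base _ ht
  | step v q hv hq hle ih => exact RF_snoc ih hq hle

theorem foldl_nodup_preserve {g : PySem.Set Int → Int → PySem.Set Int}
    (hg : ∀ r i, r.Nodup → (g r i).Nodup) :
    ∀ (ps : List Int) (acc : PySem.Set Int), acc.Nodup → (ps.foldl g acc).Nodup := by
  intro ps
  induction ps with
  | nil => intro acc h; simpa using h
  | cons q qs ih => intro acc h; simpa using ih (g acc q) (hg acc q h)

theorem rec5A_nodup (P : List Int) (L : Int) :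
    ∀ (f : Nat) (acc : PySem.Set Int) (v : Int), acc.Nodup → (rec5A P L f acc v).Nodup := by
  intro f
  induction f with
  | zero => intro acc v h; simpa [rec5A] using h
  | succ f ih =>
      intro acc v h
      by_cases hv : v ≤ L
      · simp only [rec5A, if_pos hv]
        exact foldl_nodup_preserve (fun r i hr => ih r (v * i) hr) P _ (PySem.Set.nodup_add acc v h)
      · simpa [rec5A, hv] using h

theorem rec5A_mem (P : List Int) (L : Int) (hp : ∀ p ∈ P, 2 ≤ p) :
    ∀ (f : Nat) (v : Int), 1 ≤ v → L < 2 ^ f * v →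
      ∀ (acc : PySem.Set Int) (x : Int),
        x ∈ rec5A P L f acc v ↔ x ∈ acc ∨ RF P L v x := by
  intro f
  induction f with
  | zero =>
      intro v hv hf acc x
      simp only [rec5A]
      constructor
      · exact Or.inl
      · rintro (h | h)
        · exact h
        · have hlt : L < v := by simpa using hf
          exact absurd (RF_le h) (not_le.mpr hlt)
  | succ f ih =>
      intro v hv hf acc x
      by_cases hvL : v ≤ L
      · simp only [rec5A, if_pos hvL]
        have hfold : ∀ (ps : List Int), (∀ q ∈ ps, q ∈ P) → ∀ (acc' : PySem.Set Int),
            x ∈ ps.foldl (fun r i => rec5A P L f r (v * i)) acc' ↔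
              x ∈ acc' ∨ ∃ q ∈ ps, RF P L (v * q) x := by
          intro ps
          induction ps with
          | nil => intro _ acc'; simp
          | cons q qs ihq =>
              intro hmem acc'
              have hq2 : 2 ≤ q := hp q (hmem q (List.mem_cons_self))
              have hq1 : 1 ≤ v * q := by nlinarith
              have hpow : (0 : Int) < 2 ^ f := by positivity
              have hbound : L < 2 ^ f * (v * q) := by
                have : (2 : Int) ^ (f + 1) * v ≤ 2 ^ f * (v * q) := by
                  have : (2 : Int) ^ (f + 1) = 2 ^ f * 2 := by ring
                  nlinarith
                linarith
              simp only [List.foldl_cons]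
              rw [ihq (fun r hr => hmem r (List.mem_cons_of_mem _ hr)) _,
                ih (v * q) hq1 hbound]
              constructor
              · rintro ((h | h) | ⟨q', hq', h⟩)
                · exact Or.inl h
                · exact Or.inr ⟨q, List.mem_cons_self, h⟩
                · exact Or.inr ⟨q', List.mem_cons_of_mem _ hq', h⟩
              · rintro (h | ⟨q', hq', h⟩)
                · exact Or.inl (Or.inl h)
                · rcases List.mem_cons.1 hq' with rfl | hq'
                  · exact Or.inl (Or.inr h)
                  · exact Or.inr ⟨q', hq', h⟩
        rw [hfold P (fun q hq => hq) (PySem.Set.add acc v), PySem.Set.mem_add]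
        constructor
        · rintro ((h | rfl) | ⟨q, hq, h⟩)
          · exact Or.inl h
          · exact Or.inr (RF.base _ hvL)
          · exact Or.inr (RF.step v q x hvL hq h)
        · rintro (h | h)
          · exact Or.inl (Or.inl h)
          · cases h with
            | base _ _ => exact Or.inl (Or.inr rfl)
            | step _ q _ _ hq hsub => exact Or.inr ⟨q, hq, hsub⟩
      · simp only [rec5A, if_neg hvL]
        constructor
        · exact Or.inl
        · rintro (h | h)
          · exact h
          · exact absurd (RF_le h) hvL

theorem nodup_length_le_toNat (L : Int) (l : List Int) (hn : l.Nodup)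
    (hv : ∀ x ∈ l, 1 ≤ x ∧ x ≤ L) : l.length ≤ L.toNat := by
  have hsub : l.toFinset ⊆ Finset.Icc 1 L := by
    intro x hx
    exact Finset.mem_Icc.2 (hv x (List.mem_toFinset.1 hx))
  have hcard := Finset.card_le_card hsub
  rw [List.toFinset_card_of_nodup hn] at hcard
  have hicc : (Finset.Icc (1 : Int) L).card = L.toNat := by
    rw [Int.card_Icc]; norm_num
  rw [hicc] at hcard
  exact hcard

theorem pushB (L v : Int) :
    ∀ (ps st0 : List Int) (sn0 : PySem.Set Int) (st1 : List Int) (sn1 : PySem.Set Int),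
      (st1, sn1) = ps.foldl
        (fun (p : List Int × PySem.Set Int) i =>
          if v * i ≤ L ∧ v * i ∉ p.2 then (v * i :: p.1, PySem.Set.add p.2 (v * i)) else p)
        (st0, sn0) →
      (∀ x ∈ sn0, x ∈ sn1) ∧
      (∀ x ∈ sn1, x ∈ sn0 ∨ ∃ q ∈ ps, x = v * q ∧ v * q ≤ L) ∧
      (∀ q ∈ ps, v * q ≤ L → v * q ∈ sn1) ∧
      (∀ x, x ∈ st1 ↔ x ∈ st0 ∨ (x ∈ sn1 ∧ x ∉ sn0)) ∧
      (sn0.Nodup → sn1.Nodup) ∧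
      (sn1.length + st0.length = st1.length + sn0.length) ∧
      sn0.length ≤ sn1.length := by
  intro ps
  induction ps with
  | nil =>
      intro st0 sn0 st1 sn1 heq
      simp only [List.foldl_nil] at heq
      obtain ⟨rfl, rfl⟩ := Prod.mk.injEq .. ▸ heq
      refine ⟨fun x hx => hx, fun x hx => Or.inl hx, by simp, fun x => by tauto, fun h => h, by omega, le_refl _⟩
  | cons q qs ihq =>
      intro st0 sn0 st1 sn1 heq
      simp only [List.foldl_cons] at heq
      by_cases hc : v * q ≤ L ∧ v * q ∉ sn0
      · rw [if_pos hc] at heq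
        obtain ⟨IH1, IH2, IH3, IH4, IH5, IH6, IH7⟩ := ihq (v * q :: st0) (PySem.Set.add sn0 (v * q)) st1 sn1 heq
        have hmemadd : ∀ x, x ∈ PySem.Set.add sn0 (v * q) ↔ x ∈ sn0 ∨ x = v * q :=
          fun x => PySem.Set.mem_add sn0 (v * q) x
        have hlenadd : (PySem.Set.add sn0 (v * q)).length = sn0.length + 1 := by
          rw [PySem.Set.add_of_not_mem hc.2]; simp
        refine ⟨?_, ?_, ?_, ?_, ?_, by simp at IH6; omega, by omega⟩
        · exact fun x hx => IH1 x ((hmemadd x).2 (Or.inl hx))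
        · intro x hx
          rcases IH2 x hx with h | ⟨q', hq', h⟩
          · rcases (hmemadd x).1 h with h | rfl
            · exact Or.inl h
            · exact Or.inr ⟨q, List.mem_cons_self, rfl, hc.1⟩
          · exact Or.inr ⟨q', List.mem_cons_of_mem _ hq', h⟩
        · intro q' hq' hle
          rcases List.mem_cons.1 hq' with rfl | hq'
          · exact IH1 _ ((hmemadd _).2 (Or.inr rfl))
          · exact IH3 q' hq' hle
        · intro x
          rw [IH4 x]
          constructor
          · rintro (hx | ⟨hx2, hx3⟩)
            · rcases List.mem_cons.1 hx with rfl | hx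
              · exact Or.inr ⟨IH1 _ ((hmemadd _).2 (Or.inr rfl)), hc.2⟩
              · exact Or.inl hx
            · exact Or.inr ⟨hx2, fun hx0 => hx3 ((hmemadd x).2 (Or.inl hx0))⟩
          · rintro (hx | ⟨hx2, hx3⟩)
            · exact Or.inl (List.mem_cons_of_mem _ hx)
            · by_cases hxq : x = v * q
              · exact Or.inl (hxq ▸ List.mem_cons_self)
              · exact Or.inr ⟨hx2, fun hmem => (by rcases (hmemadd x).1 hmem with h | h; exact hx3 h; exact hxq h)⟩
        · exact fun h => IH5 (PySem.Set.nodup_add sn0 (v * q) h)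
      · rw [if_neg hc] at heq
        obtain ⟨IH1, IH2, IH3, IH4, IH5, IH6, IH7⟩ := ihq st0 sn0 st1 sn1 heq
        refine ⟨IH1, ?_, ?_, IH4, IH5, IH6, IH7⟩
        · intro x hx
          rcases IH2 x hx with h | ⟨q', hq', h⟩
          · exact Or.inl h
          · exact Or.inr ⟨q', List.mem_cons_of_mem _ hq', h⟩
        · intro q' hq' hle
          rcases List.mem_cons.1 hq' with rfl | hq'
          · have hin : v * q' ∈ sn0 := by
              by_contra hnot
              exact hc ⟨hle, hnot⟩
            exact IH1 _ hin
          · exact IH3 q' hq' hle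

theorem loopB_spec (P : List Int) (L t : Int) (hp : ∀ p ∈ P, 2 ≤ p) :
    ∀ (f : Nat) (stack : List Int) (seen : PySem.Set Int),
      seen.Nodup →
      (∀ x ∈ seen, 1 ≤ x ∧ x ≤ L) →
      (∀ x ∈ stack, x ∈ seen) →
      (∀ x ∈ seen, x ∉ stack → ∀ q ∈ P, x * q ≤ L → x * q ∈ seen) →
      (∀ x ∈ seen, Rch P L t x) →
      2 * L.toNat + stack.length ≤ f + 2 * seen.length →
      (∀ x ∈ seen, x ∈ loopB P L f stack seen) ∧
      (loopB P L f stack seen).Nodup ∧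
      (∀ x ∈ loopB P L f stack seen, Rch P L t x) ∧
      (∀ x ∈ loopB P L f stack seen, ∀ q ∈ P, x * q ≤ L → x * q ∈ loopB P L f stack seen) := by
  intro f
  induction f with
  | zero =>
      intro stack seen h1 h2 h3 h4 h5 h6
      have hlen : seen.length ≤ L.toNat := nodup_length_le_toNat L seen h1 h2
      have hstack : stack = [] := by
        cases stack with
        | nil => rfl
        | cons a tl => exfalso; simp at h6; omega
      subst hstack
      simp only [loopB]
      exact ⟨fun x hx => hx, h1, h5, fun x hx q hq hle => h4 x hx (by simp) q hq hle⟩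
  | succ f ih =>
      intro stack seen h1 h2 h3 h4 h5 h6
      cases stack with
      | nil =>
          simp only [loopB]
          exact ⟨fun x hx => hx, h1, h5, fun x hx q hq hle => h4 x hx (by simp) q hq hle⟩
      | cons v rest =>
          rcases hE : P.foldl
              (fun (p : List Int × PySem.Set Int) i =>
                if v * i ≤ L ∧ v * i ∉ p.2 then (v * i :: p.1, PySem.Set.add p.2 (v * i)) else p)
              (rest, seen) with ⟨st1, sn1⟩
          have hloop : loopB P L (f + 1) (v :: rest) seen = loopB P L f st1 sn1 := by
            simp only [loopB, hE]
          obtain ⟨P1, P2, P3, P4, P5, P6, P7⟩ := pushB L v P rest seen st1 sn1 hE.symm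
          have hvseen : v ∈ seen := h3 v List.mem_cons_self
          have hv1 : 1 ≤ v := (h2 v hvseen).1
          have nodup' : sn1.Nodup := P5 h1
          have vals' : ∀ x ∈ sn1, 1 ≤ x ∧ x ≤ L := by
            intro x hx
            rcases P2 x hx with h | ⟨q, hq, rfl, hle⟩
            · exact h2 x h
            · have hq2 : 2 ≤ q := hp q hq
              exact ⟨by nlinarith, hle⟩
          have stackSub : ∀ x ∈ st1, x ∈ sn1 := by
            intro x hx
            rcases (P4 x).1 hx with h | ⟨h, _⟩
            · exact P1 x (h3 x (List.mem_cons_of_mem _ h))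
            · exact h
          have inv4' : ∀ x ∈ sn1, x ∉ st1 → ∀ q ∈ P, x * q ≤ L → x * q ∈ sn1 := by
            intro x hx hnst q hq hle
            by_cases hxo : x ∈ seen
            · by_cases hxv : x = v
              · subst hxv; exact P3 q hq hle
              · have hxrest : x ∉ rest := fun h => hnst ((P4 x).2 (Or.inl h))
                have hxs : x ∉ v :: rest := by
                  simp only [List.mem_cons]
                  rintro (rfl | h)
                  · exact hxv rfl
                  · exact hxrest h
                exact P1 _ (h4 x hxo hxs q hq hle)
            · exact absurd ((P4 x).2 (Or.inr ⟨hx, hxo⟩)) hnst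
          have sound' : ∀ x ∈ sn1, Rch P L t x := by
            intro x hx
            rcases P2 x hx with h | ⟨q, hq, rfl, hle⟩
            · exact h5 x h
            · exact Rch.step v q (h5 v hvseen) hq hle
          have fuel' : 2 * L.toNat + st1.length ≤ f + 2 * sn1.length := by
            simp only [List.length_cons] at h6
            omega
          obtain ⟨C1, C2, C3, C4⟩ := ih st1 sn1 nodup' vals' stackSub inv4' sound' fuel'
          rw [hloop]
          exact ⟨fun x hx => C1 x (P1 x hx), C2, C3, C4⟩

theorem one_le_prod (P : List Int) (hp : ∀ p ∈ P, 2 ≤ p) :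
    ∀ a : Int, 1 ≤ a → 1 ≤ P.foldl (fun t i => t * i) a := by
  induction P with
  | nil => intro a ha; simpa using ha
  | cons q qs ih =>
      intro a ha
      have hq : 2 ≤ q := hp q List.mem_cons_self
      simp only [List.foldl_cons]
      exact ih (fun p h => hp p (List.mem_cons_of_mem _ h)) (a * q) (by nlinarith)

-- ===== VERDICT (by name: the statement is the Claim_ definition above) =====
theorem count_find_num_spec : Claim_equal_count_find_num := by
  intro P L _ hpre
  unfold Spec_count_find_num count_find_num count_find_num_alt
  by_cases htemp : P.foldl (fun t i => t * i) 1 > L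
  · simp only [if_pos htemp]
  · simp only [if_neg htemp]
    have hp : ∀ p ∈ P, 2 ≤ p := by
      rcases hpre with h | h
      · exact absurd h (not_lt.2 (not_lt.1 htemp))
      · exact h
    set temp := P.foldl (fun t i => t * i) 1 with htempdef
    have htemp1 : 1 ≤ temp := one_le_prod P hp 1 le_rfl
    have htL : temp ≤ L := not_lt.1 htemp
    have hL1 : 1 ≤ L := le_trans htemp1 htL
    -- A's set
    have hApow : L < 2 ^ (L.toNat + 1) * temp := by
      have h1 : (L : Int) ≤ (L.toNat : Int) := Int.self_le_toNat L
      have h2 : (L.toNat : Int) < 2 ^ (L.toNat + 1) := by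
        exact_mod_cast Nat.lt_of_lt_of_le Nat.lt_two_pow_self
          (Nat.pow_le_pow_right (by norm_num) (Nat.le_succ _))
      have h3 : (2 : Int) ^ (L.toNat + 1) ≤ 2 ^ (L.toNat + 1) * temp :=
        le_mul_of_one_le_right (by positivity) htemp1
      linarith
    have hA : ∀ x, x ∈ rec5A P L (L.toNat + 1) PySem.Set.empty temp ↔ Rch P L temp x := by
      intro x
      rw [rec5A_mem P L hp (L.toNat + 1) temp htemp1 hApow PySem.Set.empty x]
      constructor
      · rintro (h | h)
        · simp [PySem.Set.empty] at h
        · exact RF_to_Rch h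
      · exact fun h => Or.inr (Rch_to_RF h)
    have hAnodup : (rec5A P L (L.toNat + 1) PySem.Set.empty temp).Nodup :=
      rec5A_nodup P L _ _ temp (by simp [PySem.Set.empty])
    -- B's set
    have hofl : PySem.Set.ofList [temp] = [temp] :=
      PySem.Set.ofList_eq_self_of_nodup [temp] (List.nodup_singleton _)
    obtain ⟨C1, C2, C3, C4⟩ := loopB_spec P L temp hp (2 * L.toNat + 3) [temp] [temp]
      (by simp)
      (by intro x hx; rcases List.mem_singleton.1 hx with rfl; exact ⟨htemp1, htL⟩)
      (fun x hx => hx)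
      (by intro x hx hnx; exact absurd hx hnx)
      (by intro x hx; rcases List.mem_singleton.1 hx with rfl; exact Rch.base htL)
      (by simp)
    have hB : ∀ x, x ∈ loopB P L (2 * L.toNat + 3) [temp] [temp] ↔ Rch P L temp x := by
      intro x
      constructor
      · exact C3 x
      · intro h
        induction h with
        | base _ => exact C1 temp (List.mem_singleton.2 rfl)
        | step w q hw hq hle ihw => exact C4 w ihw q hq hle
    rw [hofl]
    -- the two sets have the same members
    have hmem : ∀ x, x ∈ rec5A P L (L.toNat + 1) PySem.Set.empty temp ↔
        x ∈ loopB P L (2 * L.toNat + 3) [temp] [temp] := by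
      intro x; rw [hA x, hB x]
    have hperm : (rec5A P L (L.toNat + 1) PySem.Set.empty temp).Perm
        (loopB P L (2 * L.toNat + 3) [temp] [temp]) :=
      (List.perm_ext_iff_of_nodup hAnodup C2).2 hmem
    have hlen := hperm.length_eq
    -- the maxima agree: both sets are nonempty and max is the unique upper-bound member
    have htA : temp ∈ rec5A P L (L.toNat + 1) PySem.Set.empty temp :=
      (hA temp).2 (Rch.base htL)
    obtain ⟨m1, hm1⟩ : ∃ m1, PySem.List.max? (rec5A P L (L.toNat + 1) PySem.Set.empty temp)
        (fun x => x) = some m1 := by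
      rcases h : PySem.List.max? (rec5A P L (L.toNat + 1) PySem.Set.empty temp) (fun x => x) with
        _ | m1
      · rw [PySem.List.max?_eq_none_iff] at h
        rw [h] at htA
        simp at htA
      · exact ⟨m1, rfl⟩
    obtain ⟨m2, hm2⟩ : ∃ m2, PySem.List.max? (loopB P L (2 * L.toNat + 3) [temp] [temp])
        (fun x => x) = some m2 := by
      rcases h : PySem.List.max? (loopB P L (2 * L.toNat + 3) [temp] [temp]) (fun x => x) with
        _ | m2
      · rw [PySem.List.max?_eq_none_iff] at h
        have := (hmem temp).1 htA
        rw [h] at this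
        simp at this
      · exact ⟨m2, rfl⟩
    have hm1mem := PySem.List.max?_mem hm1
    have hm2mem := PySem.List.max?_mem hm2
    have hm1max := PySem.List.max?_isMax hm1
    have hm2max := PySem.List.max?_isMax hm2
    have hmeq : m1 = m2 :=
      le_antisymm (hm2max m1 ((hmem m1).1 hm1mem)) (hm1max m2 ((hmem m2).2 hm2mem))
    rw [hm1, hm2, hlen, hmeq]
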